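-- pv_equiv track=rewrite | github.com/PRASAD7X7/MEDISLOT | app.py | filter_booking_appointments
-- ===== SOURCE A (Python) =====
-- def filter_booking_appointments(appointments, query):
--     doctor_id = query.get("doctor_id", [None])[0]
--     clinic_id = query.get("clinic_id", [None])[0]
--     date = query.get("date", [None])[0]
--
--     filtered = appointments
--
--     if doctor_id:
--         filtered = [item for item in filtered if item["doctorId"] == doctor_id]
--
--     if clinic_id:
--         filtered = [item for item in filtered if item["clinicId"] == clinic_id]
--
--     if date:
--         filtered = [item for item in filtered if item["date"] == date]
--
--     return filtered
-- ===== SOURCE B (Python) =====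
-- def filter_booking_appointments(appointments, query):
--     crits = []
--     for key, field in (("doctor_id", "doctorId"), ("clinic_id", "clinicId"), ("date", "date")):
--         value = query.get(key, [None])[0]
--         if value:
--             crits.append((field, value))
--     return [item for item in appointments
--             if all(item[field] == value for field, value in crits)]
-- ===== Notes on version B (the rewrite author's own statement) =====
-- stated objective: simpler
-- what changed: B builds the list of active (field, value) criteria once and filters the appointments in a single pass with one combined all() predicate, instead of A's up-to-three sequential list-comprehension passes.
import Mathlib
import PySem

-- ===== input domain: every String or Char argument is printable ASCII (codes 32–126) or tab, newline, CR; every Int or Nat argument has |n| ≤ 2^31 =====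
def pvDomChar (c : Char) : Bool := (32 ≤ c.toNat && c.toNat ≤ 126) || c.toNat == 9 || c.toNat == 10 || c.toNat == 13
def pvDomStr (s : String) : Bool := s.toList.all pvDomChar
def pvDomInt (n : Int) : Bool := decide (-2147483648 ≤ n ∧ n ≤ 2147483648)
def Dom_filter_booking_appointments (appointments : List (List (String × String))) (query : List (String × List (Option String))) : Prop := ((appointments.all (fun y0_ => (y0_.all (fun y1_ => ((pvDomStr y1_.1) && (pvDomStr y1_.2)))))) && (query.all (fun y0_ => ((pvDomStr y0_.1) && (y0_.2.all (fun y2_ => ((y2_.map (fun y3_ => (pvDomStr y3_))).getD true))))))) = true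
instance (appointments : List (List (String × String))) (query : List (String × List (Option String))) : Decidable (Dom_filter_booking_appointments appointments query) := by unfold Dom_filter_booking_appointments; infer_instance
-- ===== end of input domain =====

-- ===== PORT A =====
-- B replaces A's up-to-three sequential filtering passes with one pass over a list of
-- active criteria (objective: simpler).
-- query.get(k, [None]): first-match association-list lookup with default
def aQGet (query : List (String × List (Option String))) (k : String) : List (Option String) :=
  ((query.find? (fun kv => kv.1 == k)).map (fun kv => kv.2)).getD [none]

-- item[f] for a dict item: first-match lookup; Pre_ excludes the KeyError case, default "" unused inside Pre_
def aItemGet (item : List (String × String)) (f : String) : String :=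
  ((item.find? (fun kv => kv.1 == f)).map (fun kv => kv.2)).getD ""

-- Python truthiness of an Optional[str]
def aTruthy : Option String → Bool
  | none => false
  | some s => !(s == "")

def filter_booking_appointments (appointments : List (List (String × String))) (query : List (String × List (Option String))) : List (List (String × String)) :=
  -- [0] on the looked-up list: PySem.List.pyGet?; Pre_ excludes the IndexError (empty list) case
  let doctor_id := (PySem.List.pyGet? (aQGet query "doctor_id") 0).getD none
  let clinic_id := (PySem.List.pyGet? (aQGet query "clinic_id") 0).getD none
  let date := (PySem.List.pyGet? (aQGet query "date") 0).getD none
  let filtered := appointments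
  let filtered := if aTruthy doctor_id then filtered.filter (fun item => aItemGet item "doctorId" == doctor_id.getD "") else filtered
  let filtered := if aTruthy clinic_id then filtered.filter (fun item => aItemGet item "clinicId" == clinic_id.getD "") else filtered
  let filtered := if aTruthy date then filtered.filter (fun item => aItemGet item "date" == date.getD "") else filtered
  filtered

-- ===== PORT B =====
def bQGet (query : List (String × List (Option String))) (k : String) : List (Option String) :=
  ((query.find? (fun kv => kv.1 == k)).map (fun kv => kv.2)).getD [none]

def bItemGet (item : List (String × String)) (f : String) : String :=
  ((item.find? (fun kv => kv.1 == f)).map (fun kv => kv.2)).getD ""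

-- the for-loop building crits (append only when the value is truthy)
def bCrits (query : List (String × List (Option String))) : List (String × String) :=
  [("doctor_id", "doctorId"), ("clinic_id", "clinicId"), ("date", "date")].foldl
    (fun crits kf =>
      match (PySem.List.pyGet? (bQGet query kf.1) 0).getD none with
      | none => crits
      | some s => if s == "" then crits else crits ++ [(kf.2, s)]) []

def filter_booking_appointments_alt (appointments : List (List (String × String))) (query : List (String × List (Option String))) : List (List (String × String)) :=
  let crits := bCrits query
  appointments.filter (fun item => crits.all (fun fv => bItemGet item fv.1 == fv.2))

-- ===== PRECONDITION & SPEC =====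
-- Pre_ helpers (independent of both ports): the active value of a query criterion, key presence, and
-- whether an item passes an (optional) criterion — used to state exactly where Python A (and B) raise.
def pvQRaw (query : List (String × List (Option String))) (k : String) : List (Option String) :=
  ((query.find? (fun kv => kv.1 == k)).map (fun kv => kv.2)).getD [none]

def pvAct (query : List (String × List (Option String))) (k : String) : Option String :=
  match (pvQRaw query k).head? with
  | some (some s) => if s == "" then none else some s
  | _ => none

def pvHas (item : List (String × String)) (f : String) : Bool :=
  (item.find? (fun kv => kv.1 == f)).isSome

def pvPass (item : List (String × String)) (o : Option String) (f : String) : Bool :=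
  match o with
  | none => true
  | some s => ((item.find? (fun kv => kv.1 == f)).map (fun kv => kv.2)).getD "" == s

-- Pre_ = exactly the inputs on which the Python A returns: each of the three query lists present is
-- nonempty (else IndexError on [0]), and each appointment reached by an active filter has that filter's
-- field (else KeyError); later filters only reach items that passed the earlier ones.
def Pre_filter_booking_appointments (appointments : List (List (String × String))) (query : List (String × List (Option String))) : Prop :=
  pvQRaw query "doctor_id" ≠ [] ∧ pvQRaw query "clinic_id" ≠ [] ∧ pvQRaw query "date" ≠ [] ∧
  (∀ it ∈ appointments, (pvAct query "doctor_id").isSome → pvHas it "doctorId" = true) ∧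
  (∀ it ∈ appointments, (pvAct query "clinic_id").isSome → pvPass it (pvAct query "doctor_id") "doctorId" = true → pvHas it "clinicId" = true) ∧
  (∀ it ∈ appointments, (pvAct query "date").isSome → pvPass it (pvAct query "doctor_id") "doctorId" = true → pvPass it (pvAct query "clinic_id") "clinicId" = true → pvHas it "date" = true)

instance (appointments : List (List (String × String))) (query : List (String × List (Option String))) : Decidable (Pre_filter_booking_appointments appointments query) := by unfold Pre_filter_booking_appointments; infer_instance

def pvWitness_filter_booking_appointments : (List (List (String × String))) × (List (String × List (Option String))) :=
  ([[("doctorId", "d1"), ("clinicId", "c1"), ("date", "2024-01-01")],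
    [("doctorId", "d2"), ("clinicId", "c1"), ("date", "2024-01-02")]],
   [("doctor_id", [some "d1"]), ("date", [some "2024-01-01"])])

def Spec_filter_booking_appointments (appointments : List (List (String × String))) (query : List (String × List (Option String))) (out : List (List (String × String))) : Prop := out = filter_booking_appointments_alt appointments query
instance (appointments : List (List (String × String))) (query : List (String × List (Option String))) (out : List (List (String × String))) : Decidable (Spec_filter_booking_appointments appointments query out) := by unfold Spec_filter_booking_appointments; infer_instance

-- ===== CLAIM (what is proved, stated in full; the proofs are below) =====
def Claim_equal_filter_booking_appointments : Prop := ∀ (appointments : List (List (String × String))) (query : List (String × List (Option String))), Dom_filter_booking_appointments appointments query → Pre_filter_booking_appointments appointments query → Spec_filter_booking_appointments appointments query (filter_booking_appointments appointments query)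

-- ===== LEMMAS AND PROOFS =====
-- the heart: A's sequential conditional filters equal one filter by the conjunction of active criteria,
-- for arbitrary criterion values d c t (the equivalence holds on every input; Pre_ only marks where the
-- Pythons return rather than raise)
theorem seq_eq_one_pass (a : List (List (String × String))) (d c t : Option String) :
    (let f1 := if aTruthy d then a.filter (fun item => aItemGet item "doctorId" == d.getD "") else a
     let f2 := if aTruthy c then f1.filter (fun item => aItemGet item "clinicId" == c.getD "") else f1
     if aTruthy t then f2.filter (fun item => aItemGet item "date" == t.getD "") else f2)
    = a.filter (fun item =>
        (([("doctor_id", "doctorId"), ("clinic_id", "clinicId"), ("date", "date")].map Prod.snd).zip [d, c, t] |>.foldl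
          (fun crits fv => match fv.2 with
            | none => crits
            | some s => if s == "" then crits else crits ++ [(fv.1, s)]) []).all
          (fun fv => bItemGet item fv.1 == fv.2)) := by
  rcases d with _ | ds <;> rcases c with _ | cs <;> rcases t with _ | ts <;>
    simp only [aTruthy, bItemGet, aItemGet, List.map_cons, List.map_nil, List.zip_cons_cons,
      List.zip_nil_right, List.foldl_cons, List.foldl_nil, Bool.not_eq_true', beq_eq_false_iff_ne,
      ne_eq, ite_not, if_false, Bool.false_eq_true, List.nil_append, List.all_nil,
      List.filter_true] <;>
    split_ifs <;>
    simp_all [List.filter_filter, Bool.and_assoc, Bool.and_comm, Bool.and_left_comm]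

-- ===== VERDICT (by name: the statement is the Claim_ definition above) =====
theorem filter_booking_appointments_spec : Claim_equal_filter_booking_appointments := by
  intro a q _ _
  unfold Spec_filter_booking_appointments
  have h := seq_eq_one_pass a ((PySem.List.pyGet? (aQGet q "doctor_id") 0).getD none)
      ((PySem.List.pyGet? (aQGet q "clinic_id") 0).getD none)
      ((PySem.List.pyGet? (aQGet q "date") 0).getD none)
  simpa [filter_booking_appointments, filter_booking_appointments_alt, bCrits, aQGet, bQGet] using h
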